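-- pv_equiv track=rewrite | github.com/jawsinistro94-ctrl/AudioBook_30-11 | audiobook.py | _build_combo_string
-- ===== SOURCE A (Python) =====
-- def _build_combo_string(pressed_keys):
--     """Build a combo string from currently pressed keys (e.g., 'ctrl+alt+f1')"""
--     modifiers = []
--     regular_keys = []
--
--     for k in pressed_keys:
--         if k in ('ctrl', 'alt', 'shift'):
--             modifiers.append(k)
--         else:
--             regular_keys.append(k)
--
--     # Sort to ensure consistent ordering
--     modifiers.sort()
--     regular_keys.sort()
--
--     # Build combo: modifiers first, then regular keys
--     combo_parts = modifiers + regular_keys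
--     return '+'.join(combo_parts) if combo_parts else ''
-- ===== SOURCE B (Python) =====
-- def _build_combo_string(pressed_keys):
--     """Build a combo string from currently pressed keys (e.g., 'ctrl+alt+f1')"""
--     ordered = sorted(pressed_keys,
--                      key=lambda k: (k not in ('ctrl', 'alt', 'shift'), k))
--     return '+'.join(ordered)
-- ===== Notes on version B (the rewrite author's own statement) =====
-- stated objective: idiomatic
-- what changed: Replaces the two-bucket partition loop plus two separate sorts and a concatenation with a single stable sorted() call using a composite (is-not-modifier, key) tuple key, and drops the redundant truthiness guard before the join, which is a no-op.
import Mathlib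
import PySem

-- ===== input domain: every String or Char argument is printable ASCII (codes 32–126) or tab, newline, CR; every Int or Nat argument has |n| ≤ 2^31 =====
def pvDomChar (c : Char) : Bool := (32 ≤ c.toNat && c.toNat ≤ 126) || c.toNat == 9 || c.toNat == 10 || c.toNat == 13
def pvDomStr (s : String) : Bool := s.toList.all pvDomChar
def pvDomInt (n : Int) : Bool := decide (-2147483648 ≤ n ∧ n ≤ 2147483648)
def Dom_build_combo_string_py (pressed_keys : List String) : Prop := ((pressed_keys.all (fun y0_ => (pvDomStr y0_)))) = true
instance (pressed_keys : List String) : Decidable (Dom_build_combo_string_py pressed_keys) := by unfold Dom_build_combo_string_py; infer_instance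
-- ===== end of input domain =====

-- B replaces A's two-bucket partition loop + two sorts + concatenation by a single stable
-- sort with a composite (is-not-modifier, key) tuple key; idiomatic, same cost.


-- ===== PORT A =====
-- the tuple ('ctrl', 'alt', 'shift') the membership tests use
def pvModNames : List String := ["ctrl", "alt", "shift"]

-- partition loop: 'for k in pressed_keys: if k in (...): modifiers.append(k) else: regular_keys.append(k)'
def build_combo_string_py (pressed_keys : List String) : String :=
  let st := pressed_keys.foldl
    (fun (st : List String × List String) k =>
      if k ∈ pvModNames then (st.1 ++ [k], st.2) else (st.1, st.2 ++ [k]))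
    ([], [])
  let modifiers := PySem.List.sorted st.1 (fun x => x)
  let regular_keys := PySem.List.sorted st.2 (fun x => x)
  let combo_parts := modifiers ++ regular_keys
  if combo_parts = [] then "" else PySem.Str.join "+" combo_parts

-- ===== PORT B =====
-- sorted(pressed_keys, key=lambda k: (k not in ('ctrl','alt','shift'), k)); '+'.join(...)
def build_combo_string_py_alt (pressed_keys : List String) : String :=
  PySem.Str.join "+"
    (PySem.List.sorted2 pressed_keys (fun k => decide (k ∉ pvModNames)) (fun k => k))

-- ===== PRECONDITION & SPEC =====
def Spec_build_combo_string_py (pressed_keys : List String) (out : String) : Prop := out = build_combo_string_py_alt pressed_keys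
instance (pressed_keys : List String) (out : String) : Decidable (Spec_build_combo_string_py pressed_keys out) := by unfold Spec_build_combo_string_py; infer_instance

-- ===== CLAIM (what is proved, stated in full; the proofs are below) =====
def Claim_equal_build_combo_string_py : Prop := ∀ (pressed_keys : List String), Dom_build_combo_string_py pressed_keys → Spec_build_combo_string_py pressed_keys (build_combo_string_py pressed_keys)

-- ===== LEMMAS AND PROOFS =====

-- B's composite key, as Python's tuple (lexicographic) order
def pvKey (k : String) : Bool ×ₗ String := toLex (decide (k ∉ pvModNames), k)

lemma pvKey_injective : Function.Injective pvKey := by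
  intro a b h
  have := congrArg (fun p => (ofLex p).2) h
  simpa [pvKey] using this

-- sorted2's hand-rolled tuple comparison is exactly the lexicographic '<' on pvKey
lemma sorted2_eq_sorted_pvKey (xs : List String) :
    PySem.List.sorted2 xs (fun k => decide (k ∉ pvModNames)) (fun k => k)
      = PySem.List.sorted xs pvKey := by
  have h1 : PySem.List.sorted2 xs (fun k => decide (k ∉ pvModNames)) (fun k => k)
      = List.foldl (fun acc x => PySem.List.insertBy
          (fun a b : String => decide (decide (a ∉ pvModNames) < decide (b ∉ pvModNames)) ||
            (!decide (decide (b ∉ pvModNames) < decide (a ∉ pvModNames)) && decide (a < b)))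
          x acc) [] xs := rfl
  rw [h1, PySem.List.sorted_eq_foldl_insertBy]
  congr 1
  funext acc x
  congr 1
  funext a b
  by_cases ha : a ∈ pvModNames <;> by_cases hb : b ∈ pvModNames <;>
    simp [pvKey, Prod.Lex.lt_iff, ha, hb]

-- A's partition loop computes (filtered modifiers, filtered regular keys)
lemma partition_foldl (xs : List String) (m r : List String) :
    xs.foldl
      (fun (st : List String × List String) k =>
        if k ∈ pvModNames then (st.1 ++ [k], st.2) else (st.1, st.2 ++ [k]))
      (m, r)
    = (m ++ xs.filter (fun k => decide (k ∈ pvModNames)),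
       r ++ xs.filter (fun k => !decide (k ∈ pvModNames))) := by
  induction xs generalizing m r with
  | nil => simp
  | cons x xs ih =>
    by_cases hx : x ∈ pvModNames <;> simp [hx, ih]

-- the core list identity: one lex-keyed stable sort = sort(mods) ++ sort(regulars)
lemma combo_lists_eq (xs : List String) :
    PySem.List.sorted (xs.filter (fun k => decide (k ∈ pvModNames))) (fun x => x)
      ++ PySem.List.sorted (xs.filter (fun k => !decide (k ∈ pvModNames))) (fun x => x)
    = PySem.List.sorted xs pvKey := by
  apply PySem.List.eq_of_perm_of_pairwise_le_of_injective pvKey pvKey_injective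
  · exact ((PySem.List.sorted_perm _ _ _).append (PySem.List.sorted_perm _ _ _)).trans
      (((List.filter_append_perm _ xs).trans (PySem.List.sorted_perm xs pvKey _).symm))
  · rw [List.pairwise_append]
    refine ⟨?_, ?_, ?_⟩
    · refine (PySem.List.sorted_pairwise _ (fun x => x)).imp_of_mem ?_
      intro a b ha hb hle
      have ha' : a ∈ pvModNames := by
        have := (PySem.List.mem_sorted _ _ _ a).mp ha; simpa using (List.mem_filter.mp this).2
      have hb' : b ∈ pvModNames := by
        have := (PySem.List.mem_sorted _ _ _ b).mp hb; simpa using (List.mem_filter.mp this).2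
      simp [pvKey, Prod.Lex.le_iff, ha', hb', hle]
    · refine (PySem.List.sorted_pairwise _ (fun x => x)).imp_of_mem ?_
      intro a b ha hb hle
      have ha' : a ∉ pvModNames := by
        have := (PySem.List.mem_sorted _ _ _ a).mp ha; simpa using (List.mem_filter.mp this).2
      have hb' : b ∉ pvModNames := by
        have := (PySem.List.mem_sorted _ _ _ b).mp hb; simpa using (List.mem_filter.mp this).2
      simp [pvKey, Prod.Lex.le_iff, ha', hb', hle]
    · intro a ha b hb
      have ha' : a ∈ pvModNames := by
        have := (PySem.List.mem_sorted _ _ _ a).mp ha; simpa using (List.mem_filter.mp this).2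
      have hb' : b ∉ pvModNames := by
        have := (PySem.List.mem_sorted _ _ _ b).mp hb; simpa using (List.mem_filter.mp this).2
      simp [pvKey, Prod.Lex.le_iff, ha', hb']
  · exact PySem.List.sorted_pairwise xs pvKey

-- ===== VERDICT (by name: the statement is the Claim_ definition above) =====
theorem build_combo_string_py_spec : Claim_equal_build_combo_string_py := by
  intro xs _
  show _ = _
  unfold build_combo_string_py build_combo_string_py_alt
  rw [sorted2_eq_sorted_pvKey, partition_foldl]
  simp only [List.nil_append]
  rw [combo_lists_eq]
  split_ifs with h
  · rw [h]; rfl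
  · rfl
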